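-- pv_equiv track=rewrite | github.com/skh1225/AlgorithmStudy | BAEKJOON/5430.py | solution
-- ===== SOURCE A (Python) =====
-- def solution(p,n,x):
--     if n == 0:
--         x = []
--     else:
--         x = x[1:-1].split(',')
--     start, end = 0, len(x)
--     cnt = 0
--     for action in p:
--         if action == 'R':
--             cnt += 1
--         else:
--             if cnt%2 == 0:
--                 start += 1
--             else:
--                 end -= 1
--             if start > end:
--                 return 'error'
--     if cnt%2 == 0:
--         return '['+','.join(x[start:end])+']'
--     else:
--         return '['+','.join(reversed(x[start:end]))+']'
-- ===== SOURCE B (Python) =====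
-- def solution(p, n, x):
--     if n == 0:
--         d = []
--     else:
--         d = x[1:-1].split(',')
--     rev = False
--     for action in p:
--         if action == 'R':
--             rev = not rev
--         else:
--             if not d:
--                 return 'error'
--             d = d[:-1] if rev else d[1:]
--     if rev:
--         d.reverse()
--     return '[' + ','.join(d) + ']'
-- ===== Notes on version B (the rewrite author's own statement) =====
-- stated objective: alternative
-- what changed: A tracks two index pointers (start,end) into a fixed list plus an R-counter and detects 'error' by pointer crossing; B maintains the actual remaining list and a boolean reversed flag, physically removing an element from the appropriate end on each D and checking emptiness up front.
import Mathlib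
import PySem

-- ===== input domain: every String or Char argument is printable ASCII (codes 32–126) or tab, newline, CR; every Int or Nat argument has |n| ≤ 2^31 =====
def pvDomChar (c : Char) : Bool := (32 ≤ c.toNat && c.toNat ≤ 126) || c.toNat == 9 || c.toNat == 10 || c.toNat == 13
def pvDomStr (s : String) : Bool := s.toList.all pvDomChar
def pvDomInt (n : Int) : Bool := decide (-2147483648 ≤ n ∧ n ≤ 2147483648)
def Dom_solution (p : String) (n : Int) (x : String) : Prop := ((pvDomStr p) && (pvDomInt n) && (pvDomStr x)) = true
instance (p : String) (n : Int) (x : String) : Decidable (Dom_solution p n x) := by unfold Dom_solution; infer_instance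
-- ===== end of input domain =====

-- B replaces A's two-pointer + R-counter bookkeeping by the actual remaining list plus a reversed flag (alternative decomposition, same results).

-- ===== PORT A =====
-- shared parsing (identical first lines of A and B): if n == 0: [] else x[1:-1].split(',')
-- split? returns some because the separator "," is nonempty; getD [] only discharges the option
def parseX (n : Int) (x : String) : List String :=
  if n = 0 then []
  else (PySem.Str.split? (PySem.Str.slice x (some 1) (some (-1))) ",").getD []

-- A's for-loop: state (start, end, cnt); none = the early 'error' return
def loopA : List Char → Int → Int → Int → Option (Int × Int × Int)
  | [], s, e, c => some (s, e, c)
  | a :: rest, s, e, c =>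
    if a == 'R' then loopA rest s e (c + 1)
    else
      let s' := if c % 2 == 0 then s + 1 else s
      let e' := if c % 2 == 0 then e else e - 1
      if s' > e' then none else loopA rest s' e' c

def solution (p : String) (n : Int) (x : String) : String :=
  let xs := parseX n x
  match loopA p.toList 0 (xs.length : Int) 0 with
  | none => "error"
  | some (s, e, c) =>
    if c % 2 == 0 then
      "[" ++ PySem.Str.join "," (PySem.List.slice xs (some s) (some e)) ++ "]"
    else
      "[" ++ PySem.Str.join "," (PySem.List.slice xs (some s) (some e)).reverse ++ "]"

-- ===== PORT B =====
-- B's for-loop: state (remaining list d, reversed flag); none = the early 'error' return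
def loopB : List Char → List String → Bool → Option (List String × Bool)
  | [], d, r => some (d, r)
  | a :: rest, d, r =>
    if a == 'R' then loopB rest d (!r)
    else
      match d with
      | [] => none
      | _ :: _ => loopB rest (if r then d.dropLast else d.tail) r

def solution_alt (p : String) (n : Int) (x : String) : String :=
  let d := parseX n x
  match loopB p.toList d false with
  | none => "error"
  | some (d, r) =>
    "[" ++ PySem.Str.join "," (if r then d.reverse else d) ++ "]"

-- ===== PRECONDITION & SPEC =====
def Spec_solution (p : String) (n : Int) (x : String) (out : String) : Prop := out = solution_alt p n x
instance (p : String) (n : Int) (x : String) (out : String) : Decidable (Spec_solution p n x out) := by unfold Spec_solution; infer_instance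

-- ===== CLAIM (what is proved, stated in full; the proofs are below) =====
def Claim_equal_solution : Prop := ∀ (p : String) (n : Int) (x : String), Dom_solution p n x → Spec_solution p n x (solution p n x)

-- ===== LEMMAS AND PROOFS =====

lemma tail_take' (l : List String) (k : Nat) : (l.take k).tail = l.tail.take (k - 1) := by
  cases l <;> cases k <;> simp

lemma take_drop_tail (xs : List String) (s k : Nat) :
    ((xs.drop s).take k).tail = (xs.drop (s + 1)).take (k - 1) := by
  rw [tail_take', List.tail_drop]

lemma take_drop_dropLast (xs : List String) (s k : Nat) (h : s + k <= xs.length) :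
    ((xs.drop s).take k).dropLast = (xs.drop s).take (k - 1) := by
  rw [List.dropLast_eq_take, List.length_take, List.take_take]
  congr 1
  rw [List.length_drop]
  omega

lemma parity_flip (c : Int) : ((c + 1) % 2 == 1) = !(c % 2 == 1) := by
  rcases Int.emod_two_eq c with h | h <;>
    simp [h, show (c + 1) % 2 = 1 - c % 2 by omega]

lemma take_drop_nonempty (xs : List String) (s e : Nat) (hlt : s < e) (hel : e <= xs.length) :
    ∃ y ys, (xs.drop s).take (e - s) = y :: ys := by
  have hlen : ((xs.drop s).take (e - s)).length = e - s := by
    rw [List.length_take, List.length_drop]; omega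
  cases hd : (xs.drop s).take (e - s) with
  | nil => rw [hd] at hlen; simp at hlen; omega
  | cons y ys => exact ⟨y, ys, rfl⟩

-- invariant: loopB's remaining list is exactly xs[s:e] and its flag is cnt's parity
lemma loop_agree (chars : List Char) (xs : List String) :
    ∀ (s e : Nat) (c : Int), s <= e → e <= xs.length →
    (match loopA chars (s : Int) (e : Int) c with
     | none => loopB chars ((xs.drop s).take (e - s)) (c % 2 == 1) = none
     | some (s', e', c') => ∃ sN eN : Nat, s' = (sN : Int) ∧ e' = (eN : Int) ∧
         sN <= eN ∧ eN <= xs.length ∧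
         loopB chars ((xs.drop s).take (e - s)) (c % 2 == 1)
           = some ((xs.drop sN).take (eN - sN), c' % 2 == 1)) := by
  induction chars with
  | nil =>
    intro s e c hse hel
    simp only [loopA, loopB]
    exact ⟨s, e, rfl, rfl, hse, hel, rfl⟩
  | cons a rest ih =>
    intro s e c hse hel
    by_cases hr : (a == 'R') = true
    · have hA1 : loopA (a :: rest) (s : Int) (e : Int) c = loopA rest (s : Int) (e : Int) (c + 1) := by
        simp [loopA, hr]
      have hB1 : loopB (a :: rest) ((xs.drop s).take (e - s)) (c % 2 == 1)
          = loopB rest ((xs.drop s).take (e - s)) (!(c % 2 == 1)) := by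
        simp [loopB, hr]
      rw [hA1, hB1, ← parity_flip]
      exact ih s e (c + 1) hse hel
    · rcases Int.emod_two_eq c with hc | hc
      · -- cnt even: A does start += 1, B drops from the left
        by_cases hee : s = e
        · subst hee
          simp [loopA, loopB, hr, hc]
        · have hlt : s < e := lt_of_le_of_ne hse hee
          obtain ⟨y, ys, hd⟩ := take_drop_nonempty xs s e hlt hel
          have hA1 : loopA (a :: rest) (s : Int) (e : Int) c
              = loopA rest ((s + 1 : Nat) : Int) (e : Int) c := by
            have hgt : ¬ ((s : Int) + 1 > (e : Int)) := by omega
            simp [loopA, hr, hc, hgt]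
          have hflag : (c % 2 == 1) = false := by simp [hc]
          have htail : (y :: ys).tail = (xs.drop (s + 1)).take (e - (s + 1)) := by
            rw [← hd, take_drop_tail, Nat.sub_sub]
          have hB1 : loopB (a :: rest) ((xs.drop s).take (e - s)) (c % 2 == 1)
              = loopB rest ((xs.drop (s + 1)).take (e - (s + 1))) (c % 2 == 1) := by
            rw [hflag, hd]
            simp only [loopB, hr]
            simp [htail]
          rw [hA1, hB1]
          exact ih (s + 1) e c (by omega) hel
      · -- cnt odd: A does end -= 1, B drops from the right
        by_cases hee : s = e
        · subst hee
          simp [loopA, loopB, hr, hc]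
        · have hlt : s < e := lt_of_le_of_ne hse hee
          obtain ⟨y, ys, hd⟩ := take_drop_nonempty xs s e hlt hel
          have hA1 : loopA (a :: rest) (s : Int) (e : Int) c
              = loopA rest (s : Int) ((e - 1 : Nat) : Int) c := by
            have hgt : ¬ ((s : Int) > (e : Int) - 1) := by omega
            simp [loopA, hr, hc, hgt]
            rw [show ((e : Int) - 1) = ((e - 1 : Nat) : Int) by omega]
          have hflag : (c % 2 == 1) = true := by simp [hc]
          have hdl : (y :: ys).dropLast = (xs.drop s).take (e - 1 - s) := by
            rw [← hd, take_drop_dropLast xs s (e - s) (by omega)]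
            congr 1
            omega
          have hB1 : loopB (a :: rest) ((xs.drop s).take (e - s)) (c % 2 == 1)
              = loopB rest ((xs.drop s).take (e - 1 - s)) (c % 2 == 1) := by
            rw [hflag, hd]
            simp only [loopB, hr]
            simp [hdl]
          rw [hA1, hB1]
          exact ih s (e - 1) c (by omega) (by omega)

-- ===== VERDICT (by name: the statement is the Claim_ definition above) =====
theorem solution_spec : Claim_equal_solution := by
  intro p n x _
  unfold Spec_solution
  have h := loop_agree p.toList (parseX n x) 0 (parseX n x).length 0
    (Nat.zero_le _) (le_refl _)
  simp only [Nat.cast_zero, Nat.sub_zero, List.drop_zero, List.take_length] at h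
  cases hA : loopA p.toList 0 ((parseX n x).length : Int) 0 with
  | none =>
    rw [hA] at h
    have h' : loopB p.toList (parseX n x) false = none := by simpa using h
    simp [solution, solution_alt, hA, h']
  | some t =>
    obtain ⟨s', e', c'⟩ := t
    rw [hA] at h
    obtain ⟨sN, eN, hs, he, hle, hlen, hB⟩ := h
    subst hs; subst he
    have h' : loopB p.toList (parseX n x) false
        = some (((parseX n x).drop sN).take (eN - sN), c' % 2 == 1) := by simpa using hB
    rcases Int.emod_two_eq c' with hc | hc <;>
      simp [solution, solution_alt, hA, h', hc, PySem.List.slice_natCast]
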